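-- pv_equiv track=rewrite | github.com/rohan-chand-m-01/MedChain-BlockChain | backend/services/random_forest.py | _infer_disease_type
-- ===== SOURCE A (Python) =====
-- def _infer_disease_type(biomarkers: dict) -> str:
--     """Infer disease type from biomarkers present."""
--     # Normalize keys
--     keys = [k.lower() for k in biomarkers.keys()]
--
--     # Check for diabetes markers
--     diabetes_markers = ["glucose", "hba1c", "insulin", "blood_sugar"]
--     if any(marker in keys for marker in diabetes_markers):
--         return "diabetes"
--
--     # Check for heart markers
--     heart_markers = ["cholesterol", "ldl", "hdl", "triglycerides", "total_cholesterol"]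
--     if any(marker in keys for marker in heart_markers):
--         return "heart"
--
--     # Check for kidney markers
--     kidney_markers = ["creatinine", "bun", "gfr", "albumin", "urea"]
--     if any(marker in keys for marker in kidney_markers):
--         return "kidney"
--
--     return None
-- ===== SOURCE B (Python) =====
-- _INDEX = {
--     "glucose": "diabetes", "hba1c": "diabetes", "insulin": "diabetes", "blood_sugar": "diabetes",
--     "cholesterol": "heart", "ldl": "heart", "hdl": "heart", "triglycerides": "heart",
--     "total_cholesterol": "heart",
--     "creatinine": "kidney", "bun": "kidney", "gfr": "kidney", "albumin": "kidney", "urea": "kidney",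
-- }
--
--
-- def _infer_disease_type(biomarkers: dict) -> str:
--     """Infer disease type from biomarkers present."""
--     found = set()
--     for k in biomarkers:
--         disease = _INDEX.get(k.lower())
--         if disease is not None:
--             found.add(disease)
--     for disease in ["diabetes", "heart", "kidney"]:
--         if disease in found:
--             return disease
--     return None
-- ===== Notes on version B (the rewrite author's own statement) =====
-- stated objective: idiomatic
-- what changed: Replaces three sequential scans of fixed marker lists against the key list with a single inverted-index dict lookup pass over the keys collecting the diseases found, then an explicit priority-list resolution.
import Mathlib
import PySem

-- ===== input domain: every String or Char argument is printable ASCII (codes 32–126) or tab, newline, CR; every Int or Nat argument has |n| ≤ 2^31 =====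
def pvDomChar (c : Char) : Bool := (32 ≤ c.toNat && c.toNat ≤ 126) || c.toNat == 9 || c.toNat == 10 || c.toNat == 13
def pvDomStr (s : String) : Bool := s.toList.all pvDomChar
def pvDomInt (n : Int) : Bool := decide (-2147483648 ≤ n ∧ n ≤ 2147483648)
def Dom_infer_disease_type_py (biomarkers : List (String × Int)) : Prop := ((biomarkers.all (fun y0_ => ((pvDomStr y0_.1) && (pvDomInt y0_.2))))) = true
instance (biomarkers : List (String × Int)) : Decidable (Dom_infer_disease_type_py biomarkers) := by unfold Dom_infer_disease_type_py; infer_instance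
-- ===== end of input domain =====

-- B replaces A's three sequential marker-list scans by one pass over the keys through an
-- inverted-index dict, collecting the diseases found, then resolves by an explicit priority list.

-- ===== PORT A =====
def infer_disease_type_py (biomarkers : List (String × Int)) : Option String :=
  let keys := biomarkers.map (fun p => PySem.Str.lower p.1)
  let diabetes_markers := ["glucose", "hba1c", "insulin", "blood_sugar"]
  if diabetes_markers.any (fun marker => keys.contains marker) then some "diabetes"
  else
    let heart_markers := ["cholesterol", "ldl", "hdl", "triglycerides", "total_cholesterol"]
    if heart_markers.any (fun marker => keys.contains marker) then some "heart"
    else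
      let kidney_markers := ["creatinine", "bun", "gfr", "albumin", "urea"]
      if kidney_markers.any (fun marker => keys.contains marker) then some "kidney"
      else none

-- ===== PORT B =====
-- the module-level inverted index _INDEX of Source B
def pvIndex : PySem.Dict String String :=
  PySem.Dict.ofList [("glucose","diabetes"), ("hba1c","diabetes"), ("insulin","diabetes"),
    ("blood_sugar","diabetes"), ("cholesterol","heart"), ("ldl","heart"), ("hdl","heart"),
    ("triglycerides","heart"), ("total_cholesterol","heart"), ("creatinine","kidney"),
    ("bun","kidney"), ("gfr","kidney"), ("albumin","kidney"), ("urea","kidney")]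

def infer_disease_type_py_alt (biomarkers : List (String × Int)) : Option String :=
  let found : PySem.Set String := biomarkers.foldl
    (fun s p =>
      match pvIndex.get? (PySem.Str.lower p.1) with
      | some disease => PySem.Set.add s disease
      | none => s)
    PySem.Set.empty
  ["diabetes", "heart", "kidney"].find? (fun disease => PySem.Set.contains found disease)

-- ===== PRECONDITION & SPEC =====
def Spec_infer_disease_type_py (biomarkers : List (String × Int)) (out : Option String) : Prop := out = infer_disease_type_py_alt biomarkers
instance (biomarkers : List (String × Int)) (out : Option String) : Decidable (Spec_infer_disease_type_py biomarkers out) := by unfold Spec_infer_disease_type_py; infer_instance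

-- ===== CLAIM (what is proved, stated in full; the proofs are below) =====
def Claim_equal_infer_disease_type_py : Prop := ∀ (biomarkers : List (String × Int)), Dom_infer_disease_type_py biomarkers → Spec_infer_disease_type_py biomarkers (infer_disease_type_py biomarkers)

-- ===== LEMMAS AND PROOFS =====

-- lookup characterization of the literal inverted index
set_option maxRecDepth 2048 in
lemma pvIndex_get? (k : String) : pvIndex.get? k =
    if k ∈ ["glucose","hba1c","insulin","blood_sugar"] then some "diabetes"
    else if k ∈ ["cholesterol","ldl","hdl","triglycerides","total_cholesterol"] then some "heart"
    else if k ∈ ["creatinine","bun","gfr","albumin","urea"] then some "kidney"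
    else none := by
  have h : pvIndex.items = [("glucose","diabetes"), ("hba1c","diabetes"), ("insulin","diabetes"),
    ("blood_sugar","diabetes"), ("cholesterol","heart"), ("ldl","heart"), ("hdl","heart"),
    ("triglycerides","heart"), ("total_cholesterol","heart"), ("creatinine","kidney"),
    ("bun","kidney"), ("gfr","kidney"), ("albumin","kidney"), ("urea","kidney")] := rfl
  rw [PySem.Dict.get?, h]
  split_ifs with h1 h2 h3
  · simp only [List.mem_cons, List.not_mem_nil, or_false] at h1
    rcases h1 with rfl | rfl | rfl | rfl <;> rfl
  · simp only [List.mem_cons, List.not_mem_nil, or_false] at h2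
    rcases h2 with rfl | rfl | rfl | rfl | rfl <;> rfl
  · simp only [List.mem_cons, List.not_mem_nil, or_false] at h3
    rcases h3 with rfl | rfl | rfl | rfl | rfl <;> rfl
  · have hn : List.find? (fun p => p.1 == k)
        [("glucose","diabetes"), ("hba1c","diabetes"), ("insulin","diabetes"),
         ("blood_sugar","diabetes"), ("cholesterol","heart"), ("ldl","heart"), ("hdl","heart"),
         ("triglycerides","heart"), ("total_cholesterol","heart"), ("creatinine","kidney"),
         ("bun","kidney"), ("gfr","kidney"), ("albumin","kidney"), ("urea","kidney")] = none := by
      rw [List.find?_eq_none]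
      rintro ⟨a, b⟩ ha
      simp only [List.mem_cons, List.not_mem_nil, or_false, Prod.mk.injEq] at ha
      simp only [beq_iff_eq]
      rcases ha with ⟨rfl, rfl⟩ | ⟨rfl, rfl⟩ | ⟨rfl, rfl⟩ | ⟨rfl, rfl⟩ | ⟨rfl, rfl⟩ | ⟨rfl, rfl⟩ |
        ⟨rfl, rfl⟩ | ⟨rfl, rfl⟩ | ⟨rfl, rfl⟩ | ⟨rfl, rfl⟩ | ⟨rfl, rfl⟩ | ⟨rfl, rfl⟩ | ⟨rfl, rfl⟩ |
        ⟨rfl, rfl⟩ <;> simp_all [eq_comm]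
    rw [hn]
    rfl

lemma pvIndex_eq_diabetes (k : String) :
    pvIndex.get? k = some "diabetes" ↔ k ∈ ["glucose","hba1c","insulin","blood_sugar"] := by
  rw [pvIndex_get?]; split_ifs with ha hb hc
  · simp [ha]
  · exact iff_of_false (by simp) (by simp only [List.mem_cons, List.not_mem_nil, or_false] at hb; rcases hb with rfl|rfl|rfl|rfl|rfl <;> simp)
  · exact iff_of_false (by simp) (by simp only [List.mem_cons, List.not_mem_nil, or_false] at hc; rcases hc with rfl|rfl|rfl|rfl|rfl <;> simp)
  · exact iff_of_false (by simp) ha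

lemma pvIndex_eq_heart (k : String) :
    pvIndex.get? k = some "heart" ↔ k ∈ ["cholesterol","ldl","hdl","triglycerides","total_cholesterol"] := by
  rw [pvIndex_get?]; split_ifs with ha hb hc
  · exact iff_of_false (by simp) (by simp only [List.mem_cons, List.not_mem_nil, or_false] at ha; rcases ha with rfl|rfl|rfl|rfl <;> simp)
  · simp [hb]
  · exact iff_of_false (by simp) (by simp only [List.mem_cons, List.not_mem_nil, or_false] at hc; rcases hc with rfl|rfl|rfl|rfl|rfl <;> simp)
  · exact iff_of_false (by simp) hb

lemma pvIndex_eq_kidney (k : String) :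
    pvIndex.get? k = some "kidney" ↔ k ∈ ["creatinine","bun","gfr","albumin","urea"] := by
  rw [pvIndex_get?]; split_ifs with ha hb hc
  · exact iff_of_false (by simp) (by simp only [List.mem_cons, List.not_mem_nil, or_false] at ha; rcases ha with rfl|rfl|rfl|rfl <;> simp)
  · exact iff_of_false (by simp) (by simp only [List.mem_cons, List.not_mem_nil, or_false] at hb; rcases hb with rfl|rfl|rfl|rfl|rfl <;> simp)
  · simp [hc]
  · exact iff_of_false (by simp) hc

-- membership in the set B's loop accumulates
lemma mem_found_fold (bm : List (String × Int)) (s : PySem.Set String) (d : String) :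
    (d ∈ bm.foldl (fun s p =>
        match pvIndex.get? (PySem.Str.lower p.1) with
        | some disease => PySem.Set.add s disease
        | none => s) s) ↔
      d ∈ s ∨ ∃ p ∈ bm, pvIndex.get? (PySem.Str.lower p.1) = some d := by
  induction bm generalizing s with
  | nil => simp
  | cons hd tl ih =>
    simp only [List.foldl_cons, List.mem_cons]
    rcases hx : pvIndex.get? (PySem.Str.lower hd.1) with _ | x
    · rw [ih]; simp [hx]
    · rw [ih, PySem.Set.mem_add]
      constructor
      · rintro ((h | rfl) | ⟨p, hp, hq⟩)
        · exact Or.inl h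
        · exact Or.inr ⟨hd, Or.inl rfl, hx⟩
        · exact Or.inr ⟨p, Or.inr hp, hq⟩
      · rintro (h | ⟨p, (rfl | hp), hq⟩)
        · exact Or.inl (Or.inl h)
        · rw [hx] at hq; exact Or.inl (Or.inr (Option.some_injective _ hq).symm)
        · exact Or.inr ⟨p, hp, hq⟩

-- A's 'any(marker in keys for marker in markers)' as an existential over the input
lemma anyA_iff (bm : List (String × Int)) (ms : List String) :
    (ms.any (fun marker => (bm.map (fun p => PySem.Str.lower p.1)).contains marker) = true) ↔
      ∃ p ∈ bm, PySem.Str.lower p.1 ∈ ms := by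
  simp only [List.any_eq_true, List.contains_iff_mem, List.mem_map]
  constructor
  · rintro ⟨m, hm, p, hp, rfl⟩; exact ⟨p, hp, hm⟩
  · rintro ⟨p, hp, hm⟩; exact ⟨_, hm, p, hp, rfl⟩

-- ===== VERDICT (by name: the statement is the Claim_ definition above) =====
theorem infer_disease_type_py_spec : Claim_equal_infer_disease_type_py := by
  intro bm _
  unfold Spec_infer_disease_type_py infer_disease_type_py infer_disease_type_py_alt
  have hB : ∀ f : String → Bool, (["diabetes","heart","kidney"].find? f) =
      (if f "diabetes" = true then some "diabetes"
       else if f "heart" = true then some "heart"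
       else if f "kidney" = true then some "kidney" else none) := by
    intro f
    by_cases hd : f "diabetes" = true
    · rw [List.find?_cons_of_pos hd, if_pos hd]
    · rw [List.find?_cons_of_neg hd, if_neg hd]
      by_cases hh : f "heart" = true
      · rw [List.find?_cons_of_pos hh, if_pos hh]
      · rw [List.find?_cons_of_neg hh, if_neg hh]
        by_cases hk : f "kidney" = true
        · rw [List.find?_cons_of_pos hk, if_pos hk]
        · rw [List.find?_cons_of_neg hk, if_neg hk, List.find?_nil]
  have hfound : ∀ d : String,
      (PySem.Set.contains (bm.foldl (fun s p =>
        match pvIndex.get? (PySem.Str.lower p.1) with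
        | some disease => PySem.Set.add s disease
        | none => s) PySem.Set.empty) d = true) ↔
      ∃ p ∈ bm, pvIndex.get? (PySem.Str.lower p.1) = some d := by
    intro d
    rw [PySem.Set.contains_iff, mem_found_fold]
    simp [PySem.Set.empty]
  simp only [hB]
  have a1 := anyA_iff bm ["glucose","hba1c","insulin","blood_sugar"]
  have a2 := anyA_iff bm ["cholesterol","ldl","hdl","triglycerides","total_cholesterol"]
  have a3 := anyA_iff bm ["creatinine","bun","gfr","albumin","urea"]
  have e1 : (∃ p ∈ bm, pvIndex.get? (PySem.Str.lower p.1) = some "diabetes") ↔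
      ∃ p ∈ bm, PySem.Str.lower p.1 ∈ ["glucose","hba1c","insulin","blood_sugar"] := by
    simp only [pvIndex_eq_diabetes]
  have e2 : (∃ p ∈ bm, pvIndex.get? (PySem.Str.lower p.1) = some "heart") ↔
      ∃ p ∈ bm, PySem.Str.lower p.1 ∈ ["cholesterol","ldl","hdl","triglycerides","total_cholesterol"] := by
    simp only [pvIndex_eq_heart]
  have e3 : (∃ p ∈ bm, pvIndex.get? (PySem.Str.lower p.1) = some "kidney") ↔
      ∃ p ∈ bm, PySem.Str.lower p.1 ∈ ["creatinine","bun","gfr","albumin","urea"] := by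
    simp only [pvIndex_eq_kidney]
  have c1 := (hfound "diabetes").trans e1
  have c2 := (hfound "heart").trans e2
  have c3 := (hfound "kidney").trans e3
  by_cases h1 : ∃ p ∈ bm, PySem.Str.lower p.1 ∈ ["glucose","hba1c","insulin","blood_sugar"]
  · rw [if_pos (a1.mpr h1), if_pos (c1.mpr h1)]
  · rw [if_neg fun hc => h1 (a1.mp hc), if_neg fun hc => h1 (c1.mp hc)]
    by_cases h2 : ∃ p ∈ bm, PySem.Str.lower p.1 ∈ ["cholesterol","ldl","hdl","triglycerides","total_cholesterol"]
    · rw [if_pos (a2.mpr h2), if_pos (c2.mpr h2)]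
    · rw [if_neg fun hc => h2 (a2.mp hc), if_neg fun hc => h2 (c2.mp hc)]
      by_cases h3 : ∃ p ∈ bm, PySem.Str.lower p.1 ∈ ["creatinine","bun","gfr","albumin","urea"]
      · rw [if_pos (a3.mpr h3), if_pos (c3.mpr h3)]
      · rw [if_neg fun hc => h3 (a3.mp hc), if_neg fun hc => h3 (c3.mp hc)]
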